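-- pv_equiv track=rewrite | github.com/diegoecrx/CIS_Controls | bak/compare.py | find_unique_ips
-- ===== SOURCE A (Python) =====
-- def find_unique_ips(list1_items, list2_items):
--     """
--     Find IPs that are only in one list, not both.
--     Returns entries from list1 with IPs not in list2,
--     and entries from list2 with IPs not in list1.
--     """
--     # Extract all IPs from each list
--     def extract_ips(lst):
--         ips = set()
--         for item in lst:
--             parts = item.split()
--             if len(parts) >= 2:
--                 ips.add(parts[-1])  # Last part is IP
--         return ips
--
--     # Get entries for specific IPs
--     def get_entries_for_ips(lst, target_ips):
--         entries = []
--         for item in lst: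
--             parts = item.split()
--             if len(parts) >= 2:
--                 ip = parts[-1]
--                 if ip in target_ips:
--                     description = ' '.join(parts[:-1])
--                     entries.append((description, ip))
--         return entries
--
--     # Get all IPs from each list
--     ips1 = extract_ips(list1_items)
--     ips2 = extract_ips(list2_items)
--
--     # Find IPs that are only in one list
--     ips_only_in_list1 = ips1 - ips2  # IPs in list1 but not list2
--     ips_only_in_list2 = ips2 - ips1  # IPs in list2 but not list1
--
--     # Get full entries for these unique IPs
--     entries_only_in_list1 = get_entries_for_ips(list1_items, ips_only_in_list1)
--     entries_only_in_list2 = get_entries_for_ips(list2_items, ips_only_in_list2)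
--
--     return entries_only_in_list1, entries_only_in_list2
-- ===== SOURCE B (Python) =====
-- def find_unique_ips(list1_items, list2_items):
--     """
--     Group-by algorithm: flatten both lists into one stream of
--     (ip, (side, position, description)) records, group the records by ip,
--     emit in full every group whose records all come from one side, and
--     restore each side's original order by sorting on the stored position.
--     """
--     records = []
--     for side, lst in ((1, list1_items), (2, list2_items)):
--         for pos, item in enumerate(lst):
--             parts = item.split()
--             if len(parts) >= 2:
--                 records.append((parts[-1], (side, pos, ' '.join(parts[:-1]))))
--
--     groups = {}
--     for ip, rec in records:
--         groups.setdefault(ip, []).append(rec)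
--
--     only1, only2 = [], []
--     for ip, recs in groups.items():
--         sides = {s for s, _, _ in recs}
--         if sides == {1}:
--             only1.extend((pos, (desc, ip)) for _, pos, desc in recs)
--         elif sides == {2}:
--             only2.extend((pos, (desc, ip)) for _, pos, desc in recs)
--     only1.sort(key=lambda t: t[0])
--     only2.sort(key=lambda t: t[0])
--     return [e for _, e in only1], [e for _, e in only2]
-- ===== Notes on version B (the rewrite author's own statement) =====
-- stated objective: alternative
-- what changed: Replaces A's two per-list IP sets, set differences and per-list membership refilters by a single group-by: both lists are flattened into one stream of (ip, side, position, description) records, records are grouped by ip, groups whose records all come from one side are emitted whole, and each side's original order is restored by sorting on the stored positions.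
import Mathlib
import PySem

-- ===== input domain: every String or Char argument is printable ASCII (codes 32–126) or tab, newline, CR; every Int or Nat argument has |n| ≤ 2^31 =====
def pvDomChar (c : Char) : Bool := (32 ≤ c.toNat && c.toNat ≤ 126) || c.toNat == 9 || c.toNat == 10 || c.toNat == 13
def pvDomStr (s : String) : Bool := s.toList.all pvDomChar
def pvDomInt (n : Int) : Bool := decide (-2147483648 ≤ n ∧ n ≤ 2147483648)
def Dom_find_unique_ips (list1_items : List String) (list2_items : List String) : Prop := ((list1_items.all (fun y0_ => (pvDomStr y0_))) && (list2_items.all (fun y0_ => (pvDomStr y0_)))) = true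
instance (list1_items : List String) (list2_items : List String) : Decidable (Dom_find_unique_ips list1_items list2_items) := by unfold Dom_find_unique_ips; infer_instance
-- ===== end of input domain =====

-- B replaces A's two per-list IP sets, set differences and membership refilters by a
-- group-by: both lists are flattened into one stream of (ip, side, position, description)
-- records, records are grouped by ip, one-sided groups are emitted whole, and each side's
-- original order is restored by sorting on the stored positions (objective: alternative).

-- ===== PORT A =====
-- loop body of A's extract_ips
def pvA_extract_step (ips : PySem.Set String) (item : String) : PySem.Set String :=
  let parts := PySem.Str.split₀ item
  if 2 ≤ parts.length then PySem.Set.add ips (PySem.List.pyGetD parts (-1) "") else ips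

def pvA_extract_ips (lst : List String) : PySem.Set String :=
  lst.foldl pvA_extract_step PySem.Set.empty

-- loop body of A's get_entries_for_ips (target set curried first)
def pvA_entry_step (target_ips : PySem.Set String) (entries : List (String × String))
    (item : String) : List (String × String) :=
  let parts := PySem.Str.split₀ item
  if 2 ≤ parts.length then
    let ip := PySem.List.pyGetD parts (-1) ""
    if PySem.Set.contains target_ips ip then
      entries ++ [(PySem.Str.join " " (PySem.List.slice parts none (some (-1))), ip)]
    else entries
  else entries

def pvA_get_entries (lst : List String) (target_ips : PySem.Set String) : List (String × String) :=
  lst.foldl (pvA_entry_step target_ips) []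

def find_unique_ips (list1_items : List String) (list2_items : List String) :
    (List (String × String)) × (List (String × String)) :=
  let ips1 := pvA_extract_ips list1_items
  let ips2 := pvA_extract_ips list2_items
  let ips_only_in_list1 := PySem.Set.diff ips1 ips2
  let ips_only_in_list2 := PySem.Set.diff ips2 ips1
  (pvA_get_entries list1_items ips_only_in_list1,
   pvA_get_entries list2_items ips_only_in_list2)

-- ===== PORT B =====
-- inner loop of B's record-building pass: one list, its side tag, continuing accumulator
def pvB_feed (side : Int) (lst : List String) (recs : List (String × (Int × Int × String))) :
    List (String × (Int × Int × String)) :=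
  (PySem.List.enumerate lst).foldl (fun recs pi =>
    let parts := PySem.Str.split₀ pi.2
    if 2 ≤ parts.length then
      recs ++ [(PySem.List.pyGetD parts (-1) "",
                (side, pi.1, PySem.Str.join " " (PySem.List.slice parts none (some (-1)))))]
    else recs) recs

-- B's grouping loop: groups.setdefault(ip, []).append(rec)
def pvB_group (records : List (String × (Int × Int × String))) :
    PySem.Dict String (List (Int × Int × String)) :=
  records.foldl (fun d p => d.modify p.1 [] (· ++ [p.2])) PySem.Dict.empty

-- (pos, (desc, ip)) tuple appended by B's extend
def pvB_emit (ip : String) (r : Int × Int × String) : Int × (String × String) :=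
  (r.2.1, (r.2.2, ip))

-- body of B's loop over groups.items()
def pvB_collect_step
    (acc : List (Int × (String × String)) × List (Int × (String × String)))
    (pr : String × List (Int × Int × String)) :
    List (Int × (String × String)) × List (Int × (String × String)) :=
  let sides : PySem.Set Int := PySem.Set.ofList (pr.2.map (fun r => r.1))
  if PySem.Set.equal sides [1] then (acc.1 ++ pr.2.map (pvB_emit pr.1), acc.2)
  else if PySem.Set.equal sides [2] then (acc.1, acc.2 ++ pr.2.map (pvB_emit pr.1))
  else acc

def find_unique_ips_alt (list1_items : List String) (list2_items : List String) :
    (List (String × String)) × (List (String × String)) :=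
  let records := pvB_feed 2 list2_items (pvB_feed 1 list1_items [])
  let groups := pvB_group records
  let only := groups.items.foldl pvB_collect_step ([], [])
  ((PySem.List.sorted only.1 (fun t => t.1)).map (fun t => t.2),
   (PySem.List.sorted only.2 (fun t => t.1)).map (fun t => t.2))

-- ===== PRECONDITION & SPEC =====
def Spec_find_unique_ips (list1_items : List String) (list2_items : List String) (out : (List (String × String)) × (List (String × String))) : Prop := out = find_unique_ips_alt list1_items list2_items
instance (list1_items : List String) (list2_items : List String) (out : (List (String × String)) × (List (String × String))) : Decidable (Spec_find_unique_ips list1_items list2_items out) := by unfold Spec_find_unique_ips; infer_instance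

-- ===== CLAIM (what is proved, stated in full; the proofs are below) =====
def Claim_equal_find_unique_ips : Prop := ∀ (list1_items : List String) (list2_items : List String), Dom_find_unique_ips list1_items list2_items → Spec_find_unique_ips list1_items list2_items (find_unique_ips list1_items list2_items)

-- ===== LEMMAS AND PROOFS =====

-- proof-side abbreviations for the pieces both programs compute per line
def pvGd (item : String) : Bool := decide (2 ≤ (PySem.Str.split₀ item).length)
def pvIpOf (item : String) : String := PySem.List.pyGetD (PySem.Str.split₀ item) (-1) ""
def pvDescOf (item : String) : String :=
  PySem.Str.join " " (PySem.List.slice (PySem.Str.split₀ item) none (some (-1)))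
def pvIps (lst : List String) : List String := (lst.filter pvGd).map pvIpOf
def pvMkRec (side : Int) (pi : Int × String) : String × (Int × Int × String) :=
  (pvIpOf pi.2, (side, pi.1, pvDescOf pi.2))
def pvR (side : Int) (lst : List String) : List (String × (Int × Int × String)) :=
  (((PySem.List.enumerate lst).filter (fun pi => pvGd pi.2)).map (pvMkRec side))

-- combined record stream and the per-key record group
def pvRs (l1 l2 : List String) : List (String × (Int × Int × String)) := pvR 1 l1 ++ pvR 2 l2

def pvRecsOf (rs : List (String × (Int × Int × String))) (k : String) : List (Int × Int × String) :=
  (rs.filter (fun p => p.1 == k)).map (fun p => p.2)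

-- what pvB_collect_step contributes to each side for one (ip, recs) pair
def pvG1 (pr : String × List (Int × Int × String)) : List (Int × (String × String)) :=
  if PySem.Set.equal (PySem.Set.ofList (pr.2.map (fun r => r.1))) [1] then pr.2.map (pvB_emit pr.1)
  else []

def pvG2 (pr : String × List (Int × Int × String)) : List (Int × (String × String)) :=
  if PySem.Set.equal (PySem.Set.ofList (pr.2.map (fun r => r.1))) [1] then []
  else if PySem.Set.equal (PySem.Set.ofList (pr.2.map (fun r => r.1))) [2] then pr.2.map (pvB_emit pr.1)
  else []

-- position-annotated target value of one output side, in original list order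
def pvT (side : Int) (lst other : List String) : List (Int × (String × String)) :=
  ((pvR side lst).filter (fun p => !(decide (p.1 ∈ pvIps other)))).map (fun p => pvB_emit p.1 p.2)

theorem pvB_feed_eq (side : Int) (lst : List String)
    (acc : List (String × (Int × Int × String))) :
    pvB_feed side lst acc = acc ++ pvR side lst := by
  unfold pvB_feed pvR
  have h : (fun (recs : List (String × (Int × Int × String))) (pi : Int × String) =>
      let parts := PySem.Str.split₀ pi.2
      if 2 ≤ parts.length then
        recs ++ [(PySem.List.pyGetD parts (-1) "",
                  (side, pi.1, PySem.Str.join " " (PySem.List.slice parts none (some (-1)))))]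
      else recs)
      = fun recs pi => if (fun (pi : Int × String) => pvGd pi.2) pi = true
          then recs ++ [pvMkRec side pi] else recs := by
    funext recs pi
    simp [pvGd, pvMkRec, pvIpOf, pvDescOf]
  rw [h, PySem.List.foldl_append_if]


theorem pv_enum_proj {β : Type} (q : String → Bool) (u : String → β) (lst : List String) (s : Int) :
    ((PySem.List.enumerate lst s).filter (fun pi => q pi.2)).map (fun pi => u pi.2)
      = (lst.filter q).map u := by
  induction lst generalizing s with
  | nil => simp [PySem.List.enumerate_nil]
  | cons x t ih =>
      rw [PySem.List.enumerate_cons]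
      by_cases h : q x <;> simp [h, ih]


theorem pvR_map_fst (side : Int) (lst : List String) :
    (pvR side lst).map (fun p => p.1) = pvIps lst := by
  unfold pvR pvIps
  rw [List.map_map]
  exact pv_enum_proj pvGd pvIpOf lst 0


theorem pvR_side (side : Int) (lst : List String) :
    ∀ p ∈ pvR side lst, p.2.1 = side := by
  intro p hp
  unfold pvR at hp
  rw [List.mem_map] at hp
  obtain ⟨pi, _, rfl⟩ := hp
  rfl


theorem pvR_pairwise (side : Int) (lst : List String) :
    (pvR side lst).Pairwise (fun p q => p.2.2.1 < q.2.2.1) := by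
  unfold pvR
  rw [List.pairwise_map]
  refine List.Pairwise.imp ?_ ((PySem.List.pairwise_lt_enumerate lst 0).filter _)
  intro a b h
  simpa [pvMkRec] using h


theorem pv_mem_pvIps_iff (side : Int) (lst : List String) (k : String) :
    k ∈ pvIps lst ↔ ∃ p ∈ pvR side lst, p.1 = k := by
  rw [← pvR_map_fst side lst]
  exact List.mem_map


theorem pvB_group_keys_aux (records : List (String × (Int × Int × String)))
    (d : PySem.Dict String (List (Int × Int × String))) :
    (records.foldl (fun d p => d.modify p.1 [] (· ++ [p.2])) d).keys
      = PySem.Set.update d.keys (records.map (fun p => p.1)) := by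
  induction records generalizing d with
  | nil => simp [PySem.Set.update_nil]
  | cons p t ih =>
      rw [List.foldl_cons, ih, List.map_cons, PySem.Set.update_cons]
      congr 1
      rw [PySem.Dict.keys_modify]
      by_cases h : d.contains p.1 = true
      · rw [PySem.Dict.keys_insert_of_contains _ _ h,
          PySem.Set.add_of_mem ((PySem.Dict.contains_iff_mem_keys d p.1).1 h)]
      · rw [PySem.Dict.keys_insert_of_not_contains _ _ (by simpa using h),
          PySem.Set.add_of_not_mem (fun hm => h ((PySem.Dict.contains_iff_mem_keys d p.1).2 hm))]


theorem pvB_group_keys (records : List (String × (Int × Int × String))) :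
    (pvB_group records).keys = PySem.Set.ofList (records.map (fun p => p.1)) := by
  unfold pvB_group
  rw [pvB_group_keys_aux, PySem.Dict.keys_empty, PySem.Set.update_nil_left]


theorem pvB_group_getD (records : List (String × (Int × Int × String))) (k : String) :
    (pvB_group records).getD k [] = pvRecsOf records k := by
  unfold pvB_group pvRecsOf
  rw [PySem.Dict.getD_foldl_modify_append, PySem.Dict.getD_empty]
  rfl


theorem pv_items_eq (d : PySem.Dict String (List (Int × Int × String))) (h : d.keys.Nodup) :
    d.items = d.keys.map (fun k => (k, d.getD k [])) := by
  conv_lhs => rw [← List.map_id d.items]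
  have hk : d.keys = d.items.map (fun p => p.1) := rfl
  rw [hk, List.map_map]
  apply List.map_congr_left
  intro p hp
  have hg := PySem.Dict.getD_of_mem_items d (k := p.1) (v := p.2) (by simpa using hp) h []
  simp [Function.comp, hg]


theorem pv_collect_eq (items : List (String × List (Int × Int × String)))
    (a b : List (Int × (String × String))) :
    items.foldl pvB_collect_step (a, b) = (a ++ items.flatMap pvG1, b ++ items.flatMap pvG2) := by
  induction items generalizing a b with
  | nil => simp
  | cons pr t ih =>
      rw [List.foldl_cons]
      by_cases h1 : PySem.Set.equal (PySem.Set.ofList (pr.2.map (fun r => r.1))) [1] = true <;>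
        by_cases h2 : PySem.Set.equal (PySem.Set.ofList (pr.2.map (fun r => r.1))) [2] = true <;>
          simp [pvB_collect_step, pvG1, pvG2, h1, h2, ih]


theorem pv_sides_mem (l1 l2 : List String) (k : String) (x : Int) :
    x ∈ PySem.Set.ofList ((pvRecsOf (pvRs l1 l2) k).map (fun r => r.1))
      ↔ (x = 1 ∧ k ∈ pvIps l1) ∨ (x = 2 ∧ k ∈ pvIps l2) := by
  unfold pvRecsOf pvRs
  rw [PySem.Set.mem_ofList]
  simp only [List.map_map, List.mem_map, List.mem_filter, List.mem_append, Function.comp]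
  constructor
  · rintro ⟨p, ⟨hp | hp, hk⟩, rfl⟩
    · exact Or.inl ⟨pvR_side 1 l1 p hp, (pv_mem_pvIps_iff 1 l1 k).2 ⟨p, hp, by simpa using hk⟩⟩
    · exact Or.inr ⟨pvR_side 2 l2 p hp, (pv_mem_pvIps_iff 2 l2 k).2 ⟨p, hp, by simpa using hk⟩⟩
  · rintro (⟨rfl, hk⟩ | ⟨rfl, hk⟩)
    · obtain ⟨p, hp, rfl⟩ := (pv_mem_pvIps_iff 1 l1 k).1 hk
      exact ⟨p, ⟨Or.inl hp, by simp⟩, pvR_side 1 l1 p hp⟩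
    · obtain ⟨p, hp, rfl⟩ := (pv_mem_pvIps_iff 2 l2 k).1 hk
      exact ⟨p, ⟨Or.inr hp, by simp⟩, pvR_side 2 l2 p hp⟩


theorem pv_cond1_iff (l1 l2 : List String) (k : String) :
    (PySem.Set.equal (PySem.Set.ofList ((pvRecsOf (pvRs l1 l2) k).map (fun r => r.1))) [1] = true)
      ↔ (k ∈ pvIps l1 ∧ k ∉ pvIps l2) := by
  rw [PySem.Set.equal_iff]
  have hs := pv_sides_mem l1 l2 k
  constructor
  · intro h
    refine ⟨?_, ?_⟩
    · have h1 := (h 1).2 (by simp)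
      rw [hs 1] at h1
      rcases h1 with ⟨_, hm⟩ | ⟨h12, _⟩
      · exact hm
      · exact absurd h12 (by norm_num)
    · intro hm
      have h2 := (h 2).1 ((hs 2).2 (Or.inr ⟨rfl, hm⟩))
      simp at h2
  · rintro ⟨hm1, hm2⟩ x
    rw [hs x]
    constructor
    · rintro (⟨rfl, _⟩ | ⟨rfl, hm⟩)
      · simp
      · exact absurd hm hm2
    · intro hx
      have hx1 : x = 1 := by simpa using hx
      exact Or.inl ⟨hx1, hm1⟩


theorem pv_cond2_iff (l1 l2 : List String) (k : String) :
    (PySem.Set.equal (PySem.Set.ofList ((pvRecsOf (pvRs l1 l2) k).map (fun r => r.1))) [2] = true)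
      ↔ (k ∉ pvIps l1 ∧ k ∈ pvIps l2) := by
  rw [PySem.Set.equal_iff]
  have hs := pv_sides_mem l1 l2 k
  constructor
  · intro h
    refine ⟨?_, ?_⟩
    · intro hm
      have h1 := (h 1).1 ((hs 1).2 (Or.inl ⟨rfl, hm⟩))
      simp at h1
    · have h2 := (h 2).2 (by simp)
      rw [hs 2] at h2
      rcases h2 with ⟨h21, _⟩ | ⟨_, hm⟩
      · exact absurd h21 (by norm_num)
      · exact hm
  · rintro ⟨hm1, hm2⟩ x
    rw [hs x]
    constructor
    · rintro (⟨rfl, hm⟩ | ⟨rfl, _⟩)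
      · exact absurd hm hm1
      · simp
    · intro hx
      have hx2 : x = 2 := by simpa using hx
      exact Or.inr ⟨hx2, hm2⟩


theorem pv_filter_nil_of_not_mem (side : Int) (lst : List String) (k : String)
    (h : k ∉ pvIps lst) : (pvR side lst).filter (fun p => p.1 == k) = [] := by
  rw [List.filter_eq_nil_iff]
  intro p hp hk
  exact h ((pv_mem_pvIps_iff side lst k).2 ⟨p, hp, by simpa using hk⟩)


theorem pvT_pairwise (side : Int) (lst other : List String) :
    (pvT side lst other).Pairwise (fun a b => a.1 < b.1) := by
  unfold pvT
  rw [List.pairwise_map]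
  refine List.Pairwise.imp ?_ ((pvR_pairwise side lst).filter _)
  intro a b h
  simpa [pvB_emit] using h


theorem pv_nodup_of_pairwise_lt {α : Type} (l : List (Int × α))
    (h : l.Pairwise (fun a b => a.1 < b.1)) : l.Nodup :=
  h.imp (fun hlt he => absurd (he ▸ hlt) (lt_irrefl _))

theorem pvT_map_snd_aux (side : Int) (other lst : List String) (s : Int) :
    ((((PySem.List.enumerate lst s).filter (fun pi => pvGd pi.2)).map (pvMkRec side)).filter
          (fun p => !(decide (p.1 ∈ pvIps other)))).map (fun p => (pvB_emit p.1 p.2).2)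
      = (lst.filter (fun item => pvGd item && !(decide (pvIpOf item ∈ pvIps other)))).map
          (fun item => (pvDescOf item, pvIpOf item)) := by
  induction lst generalizing s with
  | nil => simp [PySem.List.enumerate_nil]
  | cons x t ih =>
      rw [PySem.List.enumerate_cons]
      by_cases h1 : pvGd x = true
      · by_cases h2 : pvIpOf x ∈ pvIps other
        · rw [List.filter_cons_of_pos (by simpa using h1), List.map_cons,
            List.filter_cons_of_neg (by simp [pvMkRec, h2]),
            List.filter_cons_of_neg (by simp [h1, h2])]
          exact ih (s + 1)
        · rw [List.filter_cons_of_pos (by simpa using h1), List.map_cons,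
            List.filter_cons_of_pos (by simp [pvMkRec, h2]), List.map_cons,
            List.filter_cons_of_pos (by simp [h1, h2]), List.map_cons, ih (s + 1)]
          rfl
      · rw [List.filter_cons_of_neg (by simpa using h1),
          List.filter_cons_of_neg (by simp [h1])]
        exact ih (s + 1)

theorem pv_only1_eq (l1 l2 : List String) :
    ((PySem.Set.ofList ((pvRs l1 l2).map (fun p => p.1))).flatMap
        (fun k => pvG1 (k, pvRecsOf (pvRs l1 l2) k))).Perm (pvT 1 l1 l2)
      ∧ ((PySem.Set.ofList ((pvRs l1 l2).map (fun p => p.1))).flatMap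
        (fun k => pvG1 (k, pvRecsOf (pvRs l1 l2) k))).Nodup := by
  have hinner : ∀ k, pvG1 (k, pvRecsOf (pvRs l1 l2) k)
      = if k ∈ pvIps l1 ∧ k ∉ pvIps l2 then
          ((pvR 1 l1).filter (fun p => p.1 == k)).map (fun p => pvB_emit k p.2)
        else [] := by
    intro k
    unfold pvG1
    by_cases hc : k ∈ pvIps l1 ∧ k ∉ pvIps l2
    · rw [if_pos ((pv_cond1_iff l1 l2 k).2 hc), if_pos hc]
      unfold pvRecsOf pvRs
      rw [List.filter_append, pv_filter_nil_of_not_mem 2 l2 k hc.2, List.append_nil,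
        List.map_map]
      rfl
    · rw [if_neg (fun h => hc ((pv_cond1_iff l1 l2 k).1 h)), if_neg hc]
  have hsnd : ∀ k x, x ∈ pvG1 (k, pvRecsOf (pvRs l1 l2) k) → x.2.2 = k := by
    intro k x hx
    rw [hinner k] at hx
    split_ifs at hx
    · obtain ⟨r, _, rfl⟩ := List.mem_map.1 hx
      rfl
    · simp at hx
  have hnodupG : ∀ k, (pvG1 (k, pvRecsOf (pvRs l1 l2) k)).Nodup := by
    intro k
    rw [hinner k]
    split_ifs
    · refine pv_nodup_of_pairwise_lt _ ?_
      rw [List.pairwise_map]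
      refine List.Pairwise.imp ?_ ((pvR_pairwise 1 l1).filter _)
      intro a b h
      simpa [pvB_emit] using h
    · exact List.nodup_nil
  have hnd : ((PySem.Set.ofList ((pvRs l1 l2).map (fun p => p.1))).flatMap
      (fun k => pvG1 (k, pvRecsOf (pvRs l1 l2) k))).Nodup := by
    rw [List.nodup_flatMap]
    refine ⟨fun k _ => hnodupG k, ?_⟩
    refine List.Pairwise.imp ?_ (PySem.Set.nodup_ofList _)
    intro a b hab x hxa hxb
    exact hab ((hsnd a x hxa) ▸ (hsnd b x hxb) ▸ rfl)
  have hmem : ∀ x, x ∈ (PySem.Set.ofList ((pvRs l1 l2).map (fun p => p.1))).flatMap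
      (fun k => pvG1 (k, pvRecsOf (pvRs l1 l2) k)) ↔ x ∈ pvT 1 l1 l2 := by
    intro x
    rw [List.mem_flatMap]
    unfold pvT
    constructor
    · rintro ⟨k, hk, hx⟩
      rw [hinner k] at hx
      split_ifs at hx with hc
      · obtain ⟨p, hp, rfl⟩ := List.mem_map.1 hx
        rw [List.mem_filter] at hp
        have hpk : p.1 = k := by simpa using hp.2
        refine List.mem_map.2 ⟨p, List.mem_filter.2 ⟨hp.1, by simp [hpk, hc.2]⟩, ?_⟩
        rw [hpk]
      · simp at hx
    · intro hx
      obtain ⟨p, hp, rfl⟩ := List.mem_map.1 hx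
      rw [List.mem_filter] at hp
      have h2 : p.1 ∉ pvIps l2 := by simpa using hp.2
      have h1 : p.1 ∈ pvIps l1 := (pv_mem_pvIps_iff 1 l1 p.1).2 ⟨p, hp.1, rfl⟩
      refine ⟨p.1, ?_, ?_⟩
      · rw [PySem.Set.mem_ofList, List.mem_map]
        exact ⟨p, List.mem_append_left _ hp.1, rfl⟩
      · rw [hinner p.1, if_pos ⟨h1, h2⟩]
        exact List.mem_map.2 ⟨p, List.mem_filter.2 ⟨hp.1, by simp⟩, rfl⟩
  have hT : (pvT 1 l1 l2).Nodup := pv_nodup_of_pairwise_lt _ (pvT_pairwise 1 l1 l2)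
  exact ⟨(List.perm_ext_iff_of_nodup hnd hT).2 hmem, hnd⟩


theorem pv_only2_eq (l1 l2 : List String) :
    ((PySem.Set.ofList ((pvRs l1 l2).map (fun p => p.1))).flatMap
        (fun k => pvG2 (k, pvRecsOf (pvRs l1 l2) k))).Perm (pvT 2 l2 l1)
      ∧ ((PySem.Set.ofList ((pvRs l1 l2).map (fun p => p.1))).flatMap
        (fun k => pvG2 (k, pvRecsOf (pvRs l1 l2) k))).Nodup := by
  have hinner : ∀ k, pvG2 (k, pvRecsOf (pvRs l1 l2) k)
      = if k ∉ pvIps l1 ∧ k ∈ pvIps l2 then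
          ((pvR 2 l2).filter (fun p => p.1 == k)).map (fun p => pvB_emit k p.2)
        else [] := by
    intro k
    unfold pvG2
    by_cases hc : k ∉ pvIps l1 ∧ k ∈ pvIps l2
    · rw [if_neg (fun h => hc.1 ((pv_cond1_iff l1 l2 k).1 h).1),
        if_pos ((pv_cond2_iff l1 l2 k).2 hc), if_pos hc]
      unfold pvRecsOf pvRs
      rw [List.filter_append, pv_filter_nil_of_not_mem 1 l1 k hc.1, List.nil_append,
        List.map_map]
      rfl
    · rw [if_neg hc]
      by_cases h1 : PySem.Set.equal
          (PySem.Set.ofList ((pvRecsOf (pvRs l1 l2) k).map (fun r => r.1))) [1] = true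
      · rw [if_pos h1]
      · rw [if_neg h1, if_neg (fun h => hc ((pv_cond2_iff l1 l2 k).1 h))]
  have hsnd : ∀ k x, x ∈ pvG2 (k, pvRecsOf (pvRs l1 l2) k) → x.2.2 = k := by
    intro k x hx
    rw [hinner k] at hx
    split_ifs at hx
    · obtain ⟨r, _, rfl⟩ := List.mem_map.1 hx
      rfl
    · simp at hx
  have hnodupG : ∀ k, (pvG2 (k, pvRecsOf (pvRs l1 l2) k)).Nodup := by
    intro k
    rw [hinner k]
    split_ifs
    · refine pv_nodup_of_pairwise_lt _ ?_
      rw [List.pairwise_map]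
      refine List.Pairwise.imp ?_ ((pvR_pairwise 2 l2).filter _)
      intro a b h
      simpa [pvB_emit] using h
    · exact List.nodup_nil
  have hnd : ((PySem.Set.ofList ((pvRs l1 l2).map (fun p => p.1))).flatMap
      (fun k => pvG2 (k, pvRecsOf (pvRs l1 l2) k))).Nodup := by
    rw [List.nodup_flatMap]
    refine ⟨fun k _ => hnodupG k, ?_⟩
    refine List.Pairwise.imp ?_ (PySem.Set.nodup_ofList _)
    intro a b hab x hxa hxb
    exact hab ((hsnd a x hxa) ▸ (hsnd b x hxb) ▸ rfl)
  have hmem : ∀ x, x ∈ (PySem.Set.ofList ((pvRs l1 l2).map (fun p => p.1))).flatMap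
      (fun k => pvG2 (k, pvRecsOf (pvRs l1 l2) k)) ↔ x ∈ pvT 2 l2 l1 := by
    intro x
    rw [List.mem_flatMap]
    unfold pvT
    constructor
    · rintro ⟨k, hk, hx⟩
      rw [hinner k] at hx
      split_ifs at hx with hc
      · obtain ⟨p, hp, rfl⟩ := List.mem_map.1 hx
        rw [List.mem_filter] at hp
        have hpk : p.1 = k := by simpa using hp.2
        refine List.mem_map.2 ⟨p, List.mem_filter.2 ⟨hp.1, by simp [hpk, hc.1]⟩, ?_⟩
        rw [hpk]
      · simp at hx
    · intro hx
      obtain ⟨p, hp, rfl⟩ := List.mem_map.1 hx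
      rw [List.mem_filter] at hp
      have h1 : p.1 ∉ pvIps l1 := by simpa using hp.2
      have h2 : p.1 ∈ pvIps l2 := (pv_mem_pvIps_iff 2 l2 p.1).2 ⟨p, hp.1, rfl⟩
      refine ⟨p.1, ?_, ?_⟩
      · rw [PySem.Set.mem_ofList, List.mem_map]
        exact ⟨p, List.mem_append_right _ hp.1, rfl⟩
      · rw [hinner p.1, if_pos ⟨h1, h2⟩]
        exact List.mem_map.2 ⟨p, List.mem_filter.2 ⟨hp.1, by simp⟩, rfl⟩
  have hT : (pvT 2 l2 l1).Nodup := pv_nodup_of_pairwise_lt _ (pvT_pairwise 2 l2 l1)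
  exact ⟨(List.perm_ext_iff_of_nodup hnd hT).2 hmem, hnd⟩


theorem pvT_map_snd (side : Int) (lst other : List String) :
    (pvT side lst other).map (fun t => t.2)
      = (lst.filter (fun item => pvGd item && !(decide (pvIpOf item ∈ pvIps other)))).map
          (fun item => (pvDescOf item, pvIpOf item)) := by
  unfold pvT pvR
  rw [List.map_map]
  exact pvT_map_snd_aux side other lst 0


theorem pvA_entries_eq (t : PySem.Set String) (lst : List String) :
    pvA_get_entries lst t
      = (lst.filter (fun item => pvGd item && PySem.Set.contains t (pvIpOf item))).map
          (fun item => (pvDescOf item, pvIpOf item)) := by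
  unfold pvA_get_entries
  have h : pvA_entry_step t = fun acc item =>
      if (fun item => pvGd item && PySem.Set.contains t (pvIpOf item)) item = true
      then acc ++ [(fun item => (pvDescOf item, pvIpOf item)) item] else acc := by
    funext acc item
    simp only [pvA_entry_step, pvGd, pvIpOf, pvDescOf, Bool.and_eq_true, decide_eq_true_eq]
    split_ifs <;> simp_all
  rw [h, PySem.List.foldl_append_if, List.nil_append]


theorem pvA_extract_mem (lst : List String) (x : String) :
    x ∈ pvA_extract_ips lst ↔ x ∈ pvIps lst := by
  have aux : ∀ (lst : List String) (s : PySem.Set String) (x : String),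
      x ∈ lst.foldl pvA_extract_step s ↔ x ∈ s ∨ x ∈ pvIps lst := by
    intro lst
    induction lst with
    | nil => intro s x; simp [pvIps]
    | cons item t ih =>
        intro s x
        rw [List.foldl_cons]
        by_cases h : 2 ≤ (PySem.Str.split₀ item).length
        · simp [pvA_extract_step, h, ih, pvIps, pvGd, pvIpOf, PySem.Set.mem_add]
          tauto
        · simp [pvA_extract_step, h, ih, pvIps, pvGd]
  unfold pvA_extract_ips
  rw [aux]
  simp [PySem.Set.empty]


theorem pvA_out_eq (main other : List String) :
    pvA_get_entries main (PySem.Set.diff (pvA_extract_ips main) (pvA_extract_ips other))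
      = (main.filter (fun item => pvGd item && !(decide (pvIpOf item ∈ pvIps other)))).map
          (fun item => (pvDescOf item, pvIpOf item)) := by
  rw [pvA_entries_eq]
  congr 1
  apply List.filter_congr
  intro item hitem
  by_cases hg : pvGd item = true
  · by_cases h2 : pvIpOf item ∈ pvIps other
    · simp [hg, h2, PySem.Set.mem_diff, pvA_extract_mem]
    · have hmem : pvIpOf item ∈ pvIps main :=
        List.mem_map.2 ⟨item, List.mem_filter.2 ⟨hitem, hg⟩, rfl⟩
      simp [hg, h2, PySem.Set.mem_diff, pvA_extract_mem, hmem]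
  · rw [Bool.not_eq_true] at hg
    simp [hg]


-- ===== VERDICT (by name: the statement is the Claim_ definition above) =====
theorem find_unique_ips_spec : Claim_equal_find_unique_ips := by
  intro l1 l2 _
  unfold Spec_find_unique_ips
  show find_unique_ips l1 l2 = find_unique_ips_alt l1 l2
  unfold find_unique_ips find_unique_ips_alt
  dsimp only
  rw [pvB_feed_eq, pvB_feed_eq, List.nil_append]
  have hnk : (pvB_group (pvR 1 l1 ++ pvR 2 l2)).keys.Nodup := by
    rw [pvB_group_keys]; exact PySem.Set.nodup_ofList _
  rw [pv_items_eq _ hnk, pvB_group_keys]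
  have hmap : (PySem.Set.ofList ((pvR 1 l1 ++ pvR 2 l2).map (fun p => p.1))).map
        (fun k => (k, (pvB_group (pvR 1 l1 ++ pvR 2 l2)).getD k []))
      = (PySem.Set.ofList ((pvRs l1 l2).map (fun p => p.1))).map
        (fun k => (k, pvRecsOf (pvRs l1 l2) k)) := by
    exact List.map_congr_left (fun k _ => by rw [pvB_group_getD]; rfl)
  rw [hmap, pv_collect_eq, List.flatMap_map, List.flatMap_map]
  simp only [List.nil_append]
  have h1 := pv_only1_eq l1 l2
  have h2 := pv_only2_eq l1 l2
  have hs1 : PySem.List.sorted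
      ((PySem.Set.ofList ((pvRs l1 l2).map (fun p => p.1))).flatMap
        (fun k => pvG1 (k, pvRecsOf (pvRs l1 l2) k))) (fun t => t.1) = pvT 1 l1 l2 :=
    PySem.List.sorted_eq_of_perm_of_pairwise_lt _ _ _ h1.1.symm (pvT_pairwise 1 l1 l2)
  have hs2 : PySem.List.sorted
      ((PySem.Set.ofList ((pvRs l1 l2).map (fun p => p.1))).flatMap
        (fun k => pvG2 (k, pvRecsOf (pvRs l1 l2) k))) (fun t => t.1) = pvT 2 l2 l1 :=
    PySem.List.sorted_eq_of_perm_of_pairwise_lt _ _ _ h2.1.symm (pvT_pairwise 2 l2 l1)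
  rw [hs1, hs2, pvT_map_snd, pvT_map_snd, pvA_out_eq, pvA_out_eq]
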